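-- pv_equiv track=rewrite | github.com/AlexanderKomlev/Regular_expressions_hw | main.py | duplicate_removal
-- ===== SOURCE A (Python) =====
-- def duplicate_removal(contact_list):
--     contact_dict = {}
--     for row in contact_list[1:]:
--         contact_dict.setdefault(' '.join(row[:2]), row[2:])
--         if ' '.join(row[:2]) in contact_dict.keys():
--             for idx, field in enumerate(row[2:]):
--                 if field != '':
--                     contact_dict[' '.join(row[:2])][idx] = row[idx + 2]
--
--     result = [contact_list[0]]
--     idx = 1
--     for key, value in contact_dict.items():
--         result.append([key.split()[0], key.split()[1]])
--         [result[idx].append(field) for field in value]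
--         idx += 1
--     return result
-- ===== SOURCE B (Python) =====
-- def duplicate_removal(contact_list):
--     header = contact_list[0]
--     # group rows by the joined first-two-fields key, in first-appearance order
--     groups = {}
--     for row in contact_list[1:]:
--         groups.setdefault(' '.join(row[:2]), []).append(row)
--     result = [header]
--     for key, rows in groups.items():
--         merged = list(rows[0][2:])
--         for row in rows[1:]:
--             for idx, field in enumerate(row[2:]):
--                 if field != '':
--                     merged[idx] = field
--         parts = key.split()
--         result.append([parts[0], parts[1]] + merged)
--     return result
-- ===== Notes on version B (the rewrite author's own statement) =====
-- stated objective: alternative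
-- what changed: B first builds an insertion-ordered dict from key to the list of that key's rows and then merges each group in a separate second pass, instead of A's single pass that recomputes the joined key three times per row and mutates a per-key merged list stored in the dict on every field
import Mathlib
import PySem

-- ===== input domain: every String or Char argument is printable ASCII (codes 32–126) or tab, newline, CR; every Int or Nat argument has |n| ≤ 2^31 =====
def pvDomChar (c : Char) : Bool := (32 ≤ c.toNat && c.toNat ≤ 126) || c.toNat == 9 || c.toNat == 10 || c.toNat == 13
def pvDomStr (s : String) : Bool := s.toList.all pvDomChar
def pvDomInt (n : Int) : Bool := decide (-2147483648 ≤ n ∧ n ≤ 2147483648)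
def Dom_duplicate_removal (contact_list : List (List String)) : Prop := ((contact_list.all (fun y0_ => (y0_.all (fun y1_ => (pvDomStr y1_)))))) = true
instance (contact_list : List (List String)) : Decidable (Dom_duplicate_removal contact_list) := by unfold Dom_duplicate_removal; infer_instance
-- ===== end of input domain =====

-- B groups rows by key first and merges each group in a second pass (a different decomposition
-- from A's single pass mutating per-key merged lists through the dict); same return value.

-- shared helper: the Python expression ' '.join(row[:2]), computed by both programs
def pvKey (row : List String) : String :=
  PySem.Str.join " " (PySem.List.slice row none (some 2))

-- ===== PORT A =====
-- loop body of A's first 'for row in contact_list[1:]' loop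
def pvStepA (d : PySem.Dict String (List String)) (row : List String) :
    PySem.Dict String (List String) :=
  -- contact_dict.setdefault(' '.join(row[:2]), row[2:])
  let d1 := d.setdefault (pvKey row) (PySem.List.slice row (some 2) none)
  -- if ' '.join(row[:2]) in contact_dict.keys():   (always true after the setdefault)
  if d1.contains (pvKey row) then
    -- for idx, field in enumerate(row[2:]): if field != '': contact_dict[...][idx] = row[idx + 2]
    (PySem.List.enumerate (PySem.List.slice row (some 2) none)).foldl
      (fun d p =>
        if p.2 ≠ "" then
          d.modify (pvKey row) [] (fun v => v.set p.1.toNat (PySem.List.pyGetD row (p.1 + 2) ""))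
        else d) d1
  else d1

def duplicate_removal (contact_list : List (List String)) : List (List String) :=
  let contact_dict :=
    (PySem.List.slice contact_list (some 1) none).foldl pvStepA PySem.Dict.empty
  -- result = [contact_list[0]]; then per item append [key.split()[0], key.split()[1]] and extend with value
  contact_dict.items.foldl
    (fun result kv =>
      result ++ [[PySem.List.pyGetD (PySem.Str.split₀ kv.1) 0 "",
                  PySem.List.pyGetD (PySem.Str.split₀ kv.1) 1 ""] ++ kv.2])
    [PySem.List.pyGetD contact_list 0 []]

-- ===== PORT B =====
-- inner merge loop of B: for idx, field in enumerate(row[2:]): if field != '': merged[idx] = field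
def pvMergeRow (m row : List String) : List String :=
  (PySem.List.enumerate (PySem.List.slice row (some 2) none)).foldl
    (fun m p => if p.2 ≠ "" then m.set p.1.toNat p.2 else m) m

def duplicate_removal_alt (contact_list : List (List String)) : List (List String) :=
  -- groups.setdefault(' '.join(row[:2]), []).append(row)
  let groups : PySem.Dict String (List (List String)) :=
    (PySem.List.slice contact_list (some 1) none).foldl
      (fun d row => d.modify (pvKey row) [] (fun g => g ++ [row])) PySem.Dict.empty
  -- for key, rows in groups.items(): merged = list(rows[0][2:]); merge rows[1:]; append parts + merged
  groups.items.foldl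
    (fun result kv =>
      result ++ [[PySem.List.pyGetD (PySem.Str.split₀ kv.1) 0 "",
                  PySem.List.pyGetD (PySem.Str.split₀ kv.1) 1 ""] ++
                 kv.2.tail.foldl pvMergeRow (PySem.List.slice (kv.2.headD []) (some 2) none)])
    [PySem.List.pyGetD contact_list 0 []]

-- ===== PRECONDITION & SPEC =====
-- Pre_ excludes exactly the inputs where Python A raises IndexError: the empty list, a key whose
-- whitespace-split has fewer than two tokens, or a row writing a non-empty field at a position
-- past the length of its group's first row (B raises the same exception on all of these).
def Pre_duplicate_removal (contact_list : List (List String)) : Prop :=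
  contact_list ≠ [] ∧
  ∀ r ∈ contact_list.tail,
    2 ≤ (PySem.Str.split₀ (pvKey r)).length ∧
    ∀ i ∈ List.range r.length,
      2 ≤ i → r.getD i "" ≠ "" →
      i < ((contact_list.tail.find? (fun x => pvKey x == pvKey r)).getD r).length
instance (contact_list : List (List String)) : Decidable (Pre_duplicate_removal contact_list) := by
  unfold Pre_duplicate_removal; infer_instance

def pvWitness_duplicate_removal : List (List String) :=
  [["Name", "Phone"], ["a", "b", "1", ""], ["a", "b", "", "2"]]

def Spec_duplicate_removal (contact_list : List (List String)) (out : List (List String)) : Prop := out = duplicate_removal_alt contact_list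
instance (contact_list : List (List String)) (out : List (List String)) : Decidable (Spec_duplicate_removal contact_list out) := by unfold Spec_duplicate_removal; infer_instance

-- ===== CLAIM (what is proved, stated in full; the proofs are below) =====
def Claim_equal_duplicate_removal : Prop := ∀ (contact_list : List (List String)), Dom_duplicate_removal contact_list → Pre_duplicate_removal contact_list → Spec_duplicate_removal contact_list (duplicate_removal contact_list)

-- ===== LEMMAS AND PROOFS =====

-- the merged value B computes for one group of rows
def pvGroup (rows : List (List String)) : List String :=
  rows.tail.foldl pvMergeRow (PySem.List.slice (rows.headD []) (some 2) none)

-- row[2:] is drop 2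
theorem pvSlice2 (row : List String) :
    PySem.List.slice row (some 2) none = row.drop 2 := by
  have h := PySem.List.slice_from_natCast row 2
  simpa using h

-- Set.update from the empty set is Set.ofList
theorem pvUpdateNil {a : Type} [BEq a] (xs : List a) :
    PySem.Set.update ([] : PySem.Set a) xs = PySem.Set.ofList xs := by
  rw [PySem.Set.ofList_eq_foldl]; rfl

-- every enumerated pair of row[2:] satisfies row[idx+2] = field
theorem pvEnumField (row : List String) (p : Int × String)
    (hp : p ∈ PySem.List.enumerate (PySem.List.slice row (some 2) none)) :
    PySem.List.pyGetD row (p.1 + 2) "" = p.2 := by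
  rw [pvSlice2] at hp
  rw [PySem.List.mem_enumerate_iff] at hp
  obtain ⟨k, hk, rfl⟩ := hp
  have h2 : (0 : Int) + (k : Int) + 2 = ((k + 2 : Nat) : Int) := by push_cast; ring
  simp only [h2, PySem.List.pyGetD_natCast]
  have hk2 : k + 2 < row.length := by
    have := hk; simp only [List.length_drop] at this; omega
  rw [List.getD_eq_getElem _ _ hk2, List.getElem_drop]
  have he : 2 + k = k + 2 := by omega
  simp [he]

-- a fold of self-writing set operations is a no-op
theorem pvFoldSetNoop (l : List String) (el : List (Int × String))
    (h : ∀ p ∈ el, l.set p.1.toNat p.2 = l) :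
    el.foldl (fun m p => if p.2 ≠ "" then m.set p.1.toNat p.2 else m) l = l := by
  induction el with
  | nil => rfl
  | cons p t ih =>
    simp only [List.foldl_cons]
    by_cases hp : p.2 = ""
    · rw [if_neg (by simp [hp])]
      exact ih (fun q hq => h q (List.mem_cons_of_mem _ hq))
    · rw [if_pos hp, h p List.mem_cons_self]
      exact ih (fun q hq => h q (List.mem_cons_of_mem _ hq))

-- merging a row into its own tail changes nothing
theorem pvMergeRow_self (row : List String) :
    pvMergeRow (PySem.List.slice row (some 2) none) row = PySem.List.slice row (some 2) none := by
  unfold pvMergeRow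
  rw [pvSlice2]
  apply pvFoldSetNoop
  intro p hp
  rw [PySem.List.mem_enumerate_iff] at hp
  obtain ⟨k, hk, rfl⟩ := hp
  have ht : ((0 : Int) + (k : Int)).toNat = k := by omega
  simp only [ht]
  exact List.set_getElem_self hk

-- A's inner enumerate-fold of dict modifies, observed through getD at the written key
theorem pvInnerFold_getD (el : List (Int × String)) (k : String)
    (F : Int × String → List String → List String) :
    ∀ d : PySem.Dict String (List String),
      ((el.foldl (fun d p => if p.2 ≠ "" then d.modify k [] (F p) else d) d).getD k []) =
        el.foldl (fun v p => if p.2 ≠ "" then F p v else v) (d.getD k []) := by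
  induction el with
  | nil => intro d; rfl
  | cons p t ih =>
    intro d
    simp only [List.foldl_cons]
    by_cases hp : p.2 = ""
    · rw [if_neg (by simp [hp]), if_neg (by simp [hp])]; exact ih d
    · rw [if_pos hp, if_pos hp, ih, PySem.Dict.getD_modify_self]

-- ... and at any other key it changes nothing
theorem pvInnerFold_getD_ne (el : List (Int × String)) (k c : String) (hck : c ≠ k)
    (F : Int × String → List String → List String) :
    ∀ d : PySem.Dict String (List String),
      ((el.foldl (fun d p => if p.2 ≠ "" then d.modify k [] (F p) else d) d).getD c []) =
        d.getD c [] := by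
  induction el with
  | nil => intro d; rfl
  | cons p t ih =>
    intro d
    simp only [List.foldl_cons]
    by_cases hp : p.2 = ""
    · rw [if_neg (by simp [hp])]; exact ih d
    · rw [if_pos hp, ih, PySem.Dict.getD_modify_of_ne _ _ _ hck]

-- ... and never changes the key list when k is already present
theorem pvInnerFold_keys (el : List (Int × String)) (k : String)
    (F : Int × String → List String → List String) :
    ∀ d : PySem.Dict String (List String), d.contains k = true →
      (el.foldl (fun d p => if p.2 ≠ "" then d.modify k [] (F p) else d) d).keys = d.keys := by
  induction el with
  | nil => intro d _; rfl
  | cons p t ih =>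
    intro d h
    simp only [List.foldl_cons]
    by_cases hp : p.2 = ""
    · rw [if_neg (by simp [hp])]; exact ih d h
    · rw [if_pos hp, ih _ (by rw [PySem.Dict.contains_modify]; simp [h]),
          PySem.Dict.keys_modify, PySem.Dict.keys_insert_of_contains _ _ h]

-- A's step adds the row's key and nothing else
theorem pvStepA_keys (d : PySem.Dict String (List String)) (r : List String) :
    (pvStepA d r).keys = PySem.Set.add d.keys (pvKey r) := by
  have hc : (d.setdefault (pvKey r) (PySem.List.slice r (some 2) none)).contains (pvKey r) = true := by
    rw [PySem.Dict.contains_setdefault]; simp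
  simp only [pvStepA]
  rw [if_pos hc, pvInnerFold_keys _ _ _ _ hc, PySem.Dict.keys_setdefault]
  by_cases h : d.contains (pvKey r) = true
  · rw [if_pos h]
    have hm : pvKey r ∈ d.keys := (PySem.Dict.contains_iff_mem_keys d _).mp h
    simp [PySem.Set.add, hm]
  · rw [if_neg h]
    have hm : pvKey r ∉ d.keys := fun hmem => h ((PySem.Dict.contains_iff_mem_keys d _).mpr hmem)
    simp [PySem.Set.add, hm]

-- keys of A's dict = first-appearance-ordered set of the keys
theorem pvKeysA (l : List (List String)) :
    ∀ d : PySem.Dict String (List String),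
      (l.foldl pvStepA d).keys = PySem.Set.update d.keys (l.map pvKey) := by
  induction l with
  | nil => intro d; rfl
  | cons r t ih =>
    intro d
    simp only [List.foldl_cons, List.map_cons]
    rw [ih, pvStepA_keys]
    rfl

-- keys of B's groups-dict: the same set
theorem pvKeysB (l : List (List String)) :
    (l.foldl (fun d row => d.modify (pvKey row) [] (fun g => g ++ [row]))
        (PySem.Dict.empty : PySem.Dict String (List (List String)))).keys =
      PySem.Set.ofList (l.map pvKey) := by
  have h := PySem.Dict.keys_foldl_modify_key l pvKey ([] : List (List String))
    (fun _ x => fun g => g ++ [x]) PySem.Dict.empty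
  rw [PySem.Dict.keys_empty, pvUpdateNil] at h
  exact h

-- A's step at any other key leaves the value unchanged
theorem pvStepA_getD_ne (d : PySem.Dict String (List String)) (r : List String) (c : String)
    (hc : c ≠ pvKey r) : (pvStepA d r).getD c [] = d.getD c [] := by
  have hcc : (d.setdefault (pvKey r) (PySem.List.slice r (some 2) none)).contains (pvKey r) = true := by
    rw [PySem.Dict.contains_setdefault]; simp
  simp only [pvStepA]
  rw [if_pos hcc, pvInnerFold_getD_ne _ _ _ hc,
      PySem.Dict.getD_eq_get?_getD, PySem.Dict.get?_setdefault_of_ne _ _ hc,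
      ← PySem.Dict.getD_eq_get?_getD]

-- A's step at the row's own key merges the row into the stored value
theorem pvStepA_getD_self (d : PySem.Dict String (List String)) (r : List String) :
    (pvStepA d r).getD (pvKey r) [] =
      pvMergeRow (d.getD (pvKey r) (PySem.List.slice r (some 2) none)) r := by
  have hc : (d.setdefault (pvKey r) (PySem.List.slice r (some 2) none)).contains (pvKey r) = true := by
    rw [PySem.Dict.contains_setdefault]; simp
  simp only [pvStepA]
  rw [if_pos hc, pvInnerFold_getD, PySem.Dict.getD_setdefault_self]
  unfold pvMergeRow
  exact PySem.List.foldl_congr_mem _ _ _ _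
    (fun acc p hp => by by_cases h : p.2 = "" <;> simp [h, pvEnumField r p hp])

-- B's merge of a group extended by one row
theorem pvGroup_append (r0 : List String) (g : List (List String)) (r : List String) :
    pvGroup ((r0 :: g) ++ [r]) = pvMergeRow (pvGroup (r0 :: g)) r := by
  simp [pvGroup, List.foldl_append]

-- A's dict value at any key c is B's merge of the rows with key c
theorem pvGetDA (l : List (List String)) (c : String) :
    (l.foldl pvStepA PySem.Dict.empty).getD c [] =
      pvGroup (l.filter (fun r => pvKey r == c)) := by
  induction l using List.reverseRecOn with
  | nil => simp [pvGroup, PySem.Dict.getD_empty, pvSlice2]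
  | append_singleton l r ih =>
    rw [List.foldl_append, List.foldl_cons, List.foldl_nil, List.filter_append]
    by_cases hc : pvKey r = c
    · subst hc
      simp only [List.filter_cons, List.filter_nil, beq_self_eq_true, if_true]
      rw [pvStepA_getD_self]
      by_cases h : (l.foldl pvStepA PySem.Dict.empty).contains (pvKey r) = true
      · obtain ⟨w, hw⟩ := Option.isSome_iff_exists.mp
          (show ((l.foldl pvStepA PySem.Dict.empty).get? (pvKey r)).isSome = true by
            rw [← PySem.Dict.contains_eq_isSome_get?]; exact h)
        have e1 : (l.foldl pvStepA PySem.Dict.empty).getD (pvKey r)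
            (PySem.List.slice r (some 2) none) = w := by
          rw [PySem.Dict.getD_eq_get?_getD, hw]; rfl
        have e2 : (l.foldl pvStepA PySem.Dict.empty).getD (pvKey r) [] = w := by
          rw [PySem.Dict.getD_eq_get?_getD, hw]; rfl
        rw [e1, ← e2, ih]
        have hmem : pvKey r ∈ l.map pvKey := by
          have hk := pvKeysA l PySem.Dict.empty
          rw [PySem.Dict.keys_empty, pvUpdateNil] at hk
          have := (PySem.Dict.contains_iff_mem_keys _ _).mp h
          rw [hk, PySem.Set.mem_ofList] at this
          exact this
        have hne : l.filter (fun x => pvKey x == pvKey r) ≠ [] := by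
          obtain ⟨x, hx, he⟩ := List.mem_map.mp hmem
          intro hnil
          have : x ∈ l.filter (fun x => pvKey x == pvKey r) :=
            List.mem_filter.mpr ⟨hx, by simp [he]⟩
          simp [hnil] at this
        obtain ⟨r0, g', hg⟩ := List.exists_cons_of_ne_nil hne
        rw [hg, pvGroup_append]
      · rw [PySem.Dict.getD_of_not_contains _ _ (by simpa using h)]
        have hnil : l.filter (fun x => pvKey x == pvKey r) = [] := by
          rw [List.filter_eq_nil_iff]
          intro x hx hbeq
          apply h
          have hk := pvKeysA l PySem.Dict.empty
          rw [PySem.Dict.keys_empty, pvUpdateNil] at hk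
          apply (PySem.Dict.contains_iff_mem_keys _ _).mpr
          rw [hk, PySem.Set.mem_ofList]
          exact List.mem_map.mpr ⟨x, hx, by simpa using hbeq⟩
        rw [hnil, pvMergeRow_self]
        simp [pvGroup]
    · have hb : (pvKey r == c) = false := by simp [hc]
      simp only [List.filter_cons, hb, Bool.false_eq_true, if_false, List.filter_nil,
        List.append_nil]
      rw [pvStepA_getD_ne _ _ _ (fun e => hc e.symm), ih]

-- B's groups-dict value at any key c is exactly the rows with key c
theorem pvGetDB (l : List (List String)) (c : String) :
    (l.foldl (fun d row => d.modify (pvKey row) [] (fun g => g ++ [row]))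
        (PySem.Dict.empty : PySem.Dict String (List (List String)))).getD c [] =
      l.filter (fun r => pvKey r == c) := by
  have h : l.foldl (fun d row => d.modify (pvKey row) [] (fun g => g ++ [row]))
        (PySem.Dict.empty : PySem.Dict String (List (List String)))
      = (l.map (fun r => (pvKey r, r))).foldl
          (fun d p => d.modify p.1 [] (fun g => g ++ [p.2])) PySem.Dict.empty := by
    rw [List.foldl_map]
  rw [h, PySem.Dict.getD_foldl_modify_append, PySem.Dict.getD_empty]
  simp [List.filter_map, List.map_map, Function.comp_def]

-- the two ports agree on every input (the claimed Pre_ is about the Python, not needed here)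
theorem pvPortsAgree (contact_list : List (List String)) :
    duplicate_removal contact_list = duplicate_removal_alt contact_list := by
  simp only [duplicate_removal, duplicate_removal_alt]
  rw [PySem.List.foldl_append_singleton_eq_map
        (f := fun kv : String × List String =>
          [PySem.List.pyGetD (PySem.Str.split₀ kv.1) 0 "",
           PySem.List.pyGetD (PySem.Str.split₀ kv.1) 1 ""] ++ kv.2),
      PySem.List.foldl_append_singleton_eq_map
        (f := fun kv : String × List (List String) =>
          [PySem.List.pyGetD (PySem.Str.split₀ kv.1) 0 "",
           PySem.List.pyGetD (PySem.Str.split₀ kv.1) 1 ""] ++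
          kv.2.tail.foldl pvMergeRow (PySem.List.slice (kv.2.headD []) (some 2) none))]
  congr 1
  have kA : ((PySem.List.slice contact_list (some 1) none).foldl pvStepA PySem.Dict.empty).keys =
      PySem.Set.ofList ((PySem.List.slice contact_list (some 1) none).map pvKey) := by
    rw [pvKeysA, PySem.Dict.keys_empty, pvUpdateNil]
  have nodA := kA ▸ PySem.Set.nodup_ofList ((PySem.List.slice contact_list (some 1) none).map pvKey)
  have kB := pvKeysB (PySem.List.slice contact_list (some 1) none)
  have nodB := kB ▸ PySem.Set.nodup_ofList ((PySem.List.slice contact_list (some 1) none).map pvKey)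
  rw [PySem.Dict.items_eq_map_keys _ nodA [], PySem.Dict.items_eq_map_keys _ nodB [],
      List.map_map, List.map_map, kA, kB]
  apply List.map_congr_left
  intro k _
  simp only [Function.comp_apply]
  rw [pvGetDA, pvGetDB]
  rfl


-- ===== VERDICT (by name: the statement is the Claim_ definition above) =====
theorem duplicate_removal_spec : Claim_equal_duplicate_removal := by
  intro contact_list _ _
  exact pvPortsAgree contact_list
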